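-- pv_equiv track=rewrite | github.com/mariusmeik/T120M171 | ProgramosKodas.py | find_steepestAscent_and_descent
-- ===== SOURCE A (Python) =====
-- def find_steepestAscent_and_descent(heights):
--     # Suranda staciausia pakilima ir nusileidima
--     start_of_ascend=0
--     ascend_height=0
--     start_of_descend=0
--     descend_height=0
--     for i in range(1, len(heights)):
--         if heights[i] > heights[i-1] and heights[i] - heights[i-1] > ascend_height:
--             ascend_height = heights[i] - heights[i-1]
--             start_of_ascend = i-1
--         if heights[i] < heights[i-1] and heights[i-1] - heights[i] > descend_height:
--             descend_height = heights[i-1] - heights[i]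
--             start_of_descend = i-1
--     return start_of_ascend, ascend_height, start_of_descend, descend_height
-- ===== SOURCE B (Python) =====
-- def find_steepestAscent_and_descent(heights):
--     # Diff-list decomposition: build adjacent differences once, then pick the
--     # earliest maximal positive and earliest minimal negative difference.
--     d = [heights[i] - heights[i - 1] for i in range(1, len(heights))]
--     start_of_ascend, ascend_height = 0, 0
--     pos = [x for x in d if x > 0]
--     if pos:
--         ascend_height = max(pos)
--         start_of_ascend = d.index(ascend_height)
--     start_of_descend, descend_height = 0, 0
--     neg = [x for x in d if x < 0]
--     if neg:
--         m = min(neg)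
--         descend_height = -m
--         start_of_descend = d.index(m)
--     return start_of_ascend, ascend_height, start_of_descend, descend_height
-- ===== Notes on version B (the rewrite author's own statement) =====
-- stated objective: alternative
-- what changed: B replaces A's single index-driven loop with updates-in-place by a diff-list decomposition: it builds the adjacent-difference list once, then obtains the steepest ascent as max of the positive diffs and the steepest descent as min of the negative diffs, recovering the earliest start index with list.index.
import Mathlib
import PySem

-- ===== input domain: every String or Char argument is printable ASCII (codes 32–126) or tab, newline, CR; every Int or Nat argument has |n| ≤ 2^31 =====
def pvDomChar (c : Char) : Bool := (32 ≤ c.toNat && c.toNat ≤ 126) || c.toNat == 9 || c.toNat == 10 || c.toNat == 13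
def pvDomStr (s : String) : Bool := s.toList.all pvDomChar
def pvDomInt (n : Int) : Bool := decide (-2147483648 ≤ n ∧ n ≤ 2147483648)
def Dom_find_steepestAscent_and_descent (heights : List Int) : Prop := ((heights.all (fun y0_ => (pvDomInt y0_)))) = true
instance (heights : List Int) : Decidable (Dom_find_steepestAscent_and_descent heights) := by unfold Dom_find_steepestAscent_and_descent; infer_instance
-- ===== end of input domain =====

-- B differs from A only in decomposition (diff list + max/min + index), same results.

-- ===== PORT A =====
-- one loop step of A's for-loop (state = (start_of_ascend, ascend_height, start_of_descend, descend_height))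
def stepA (heights : List Int) (s : Int × Int × Int × Int) (i : Int) : Int × Int × Int × Int :=
  let hi := PySem.List.pyGetD heights i 0
  let hp := PySem.List.pyGetD heights (i - 1) 0
  let s1 := if hi > hp ∧ hi - hp > s.2.1 then (i - 1, hi - hp, s.2.2.1, s.2.2.2) else s
  if hi < hp ∧ hp - hi > s1.2.2.2 then (s1.1, s1.2.1, i - 1, hp - hi) else s1

def find_steepestAscent_and_descent (heights : List Int) : Int × Int × Int × Int :=
  (PySem.List.pyRange 1 heights.length 1).foldl (stepA heights) (0, 0, 0, 0)

-- ===== PORT B =====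
def find_steepestAscent_and_descent_alt (heights : List Int) : Int × Int × Int × Int :=
  let d := (PySem.List.pyRange 1 heights.length 1).map
    (fun i => PySem.List.pyGetD heights i 0 - PySem.List.pyGetD heights (i - 1) 0)
  let asc : Int × Int :=
    match PySem.List.max? (d.filter (fun x => x > 0)) (fun x => x) with
    | some m => ((((PySem.List.index? d m).getD 0 : Nat) : Int), m)
    | none => (0, 0)
  let desc : Int × Int :=
    match PySem.List.min? (d.filter (fun x => x < 0)) (fun x => x) with
    | some m => ((((PySem.List.index? d m).getD 0 : Nat) : Int), -m)
    | none => (0, 0)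
  (asc.1, asc.2, desc.1, desc.2)

-- ===== PRECONDITION & SPEC =====
def Spec_find_steepestAscent_and_descent (heights : List Int) (out : Int × Int × Int × Int) : Prop := out = find_steepestAscent_and_descent_alt heights
instance (heights : List Int) (out : Int × Int × Int × Int) : Decidable (Spec_find_steepestAscent_and_descent heights out) := by unfold Spec_find_steepestAscent_and_descent; infer_instance

-- ===== CLAIM (what is proved, stated in full; the proofs are below) =====
def Claim_equal_find_steepestAscent_and_descent : Prop := ∀ (heights : List Int), Dom_find_steepestAscent_and_descent heights → Spec_find_steepestAscent_and_descent heights (find_steepestAscent_and_descent heights)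



-- ===== LEMMAS AND PROOFS =====

-- the adjacent-difference list both programs are really about
def dmap (hs : List Int) : List Int :=
  (PySem.List.pyRange 1 hs.length 1).map
    (fun i => PySem.List.pyGetD hs i 0 - PySem.List.pyGetD hs (i - 1) 0)

def ascStep (s : Int × Int) (j x : Int) : Int × Int :=
  if x > 0 ∧ x > s.2 then (j, x) else s

def descStep (s : Int × Int) (j x : Int) : Int × Int :=
  if x < 0 ∧ -x > s.2 then (j, -x) else s

def ascAux : List Int → Int → (Int × Int) → Int × Int
  | [], _, s => s
  | x :: t, j, s => ascAux t (j + 1) (ascStep s j x)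

def descAux : List Int → Int → (Int × Int) → Int × Int
  | [], _, s => s
  | x :: t, j, s => descAux t (j + 1) (descStep s j x)

def loopD : List Int → Int → (Int × Int) → (Int × Int) → (Int × Int) × (Int × Int)
  | [], _, a, b => (a, b)
  | x :: t, j, a, b => loopD t (j + 1) (ascStep a j x) (descStep b j x)

def ascOf (d : List Int) : Int × Int :=
  match PySem.List.max? (d.filter (fun x => x > 0)) (fun x => x) with
  | some m => ((((PySem.List.index? d m).getD 0 : Nat) : Int), m)
  | none => (0, 0)

def descOf (d : List Int) : Int × Int :=
  match PySem.List.min? (d.filter (fun x => x < 0)) (fun x => x) with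
  | some m => ((((PySem.List.index? d m).getD 0 : Nat) : Int), -m)
  | none => (0, 0)

theorem loopD_eq (d : List Int) : ∀ (j : Int) (a b : Int × Int),
    loopD d j a b = (ascAux d j a, descAux d j b) := by
  induction d with
  | nil => intro j a b; rfl
  | cons x t ih => intro j a b; simp [loopD, ascAux, descAux, ih]

theorem pyGetD_app_left (ys : List Int) (x : Int) (i : Int)
    (h0 : 0 ≤ i) (h1 : i < (ys.length : Int)) :
    PySem.List.pyGetD (ys ++ [x]) i 0 = PySem.List.pyGetD ys i 0 := by
  rw [PySem.List.pyGetD_eq_getElem (ys ++ [x]) 0 h0 (by simp; omega),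
      PySem.List.pyGetD_eq_getElem ys 0 h0 h1]
  exact List.getElem_append_left (by omega)

theorem pyGetD_app_last (ys : List Int) (x : Int) :
    PySem.List.pyGetD (ys ++ [x]) (ys.length : Int) 0 = x := by
  rw [PySem.List.pyGetD_eq_getElem (ys ++ [x]) 0 (by positivity) (by simp)]
  simp

theorem dmap_append (ys : List Int) (x : Int) (hne : ys ≠ []) :
    dmap (ys ++ [x])
      = dmap ys ++ [x - PySem.List.pyGetD ys ((ys.length : Int) - 1) 0] := by
  have hlen : 1 ≤ (ys.length : Int) := by
    have := List.length_pos_of_ne_nil hne; omega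
  have hr : PySem.List.pyRange 1 ((ys ++ [x]).length : Int) 1
      = PySem.List.pyRange 1 (ys.length : Int) 1 ++ [(ys.length : Int)] := by
    have h2 : ((ys ++ [x]).length : Int) = (ys.length : Int) + 1 := by simp
    rw [h2, PySem.List.pyRange_one_succ_right hlen]
  unfold dmap
  rw [hr, List.map_append]
  congr 1
  · apply List.map_congr_left
    intro i hi
    rw [PySem.List.mem_pyRange_one] at hi
    rw [pyGetD_app_left ys x i (by omega) (by omega),
        pyGetD_app_left ys x (i - 1) (by omega) (by omega)]
  · simp only [List.map_cons, List.map_nil]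
    rw [pyGetD_app_last, pyGetD_app_left ys x _ (by omega) (by omega)]

theorem stepA_pack (hs : List Int) (a b : Int × Int) (i : Int) :
    stepA hs (a.1, a.2, b.1, b.2) i
      = ((ascStep a (i - 1) (PySem.List.pyGetD hs i 0 - PySem.List.pyGetD hs (i - 1) 0)).1,
         (ascStep a (i - 1) (PySem.List.pyGetD hs i 0 - PySem.List.pyGetD hs (i - 1) 0)).2,
         (descStep b (i - 1) (PySem.List.pyGetD hs i 0 - PySem.List.pyGetD hs (i - 1) 0)).1,
         (descStep b (i - 1) (PySem.List.pyGetD hs i 0 - PySem.List.pyGetD hs (i - 1) 0)).2) := by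
  unfold stepA ascStep descStep
  set hi := PySem.List.pyGetD hs i 0 with hhi
  set hp := PySem.List.pyGetD hs (i - 1) 0 with hhp
  by_cases c1 : hi > hp ∧ hi - hp > a.2 <;>
    by_cases c2 : hi < hp ∧ hp - hi > b.2 <;>
      by_cases c1' : hi - hp > 0 ∧ hi - hp > a.2 <;>
        by_cases c2' : hi - hp < 0 ∧ -(hi - hp) > b.2 <;>
          simp [c1, c2, c1', c2'] <;> omega

theorem ascAux_append (d : List Int) (y : Int) : ∀ (j : Int) (s : Int × Int),
    ascAux (d ++ [y]) j s = ascStep (ascAux d j s) (j + (d.length : Int)) y := by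
  induction d with
  | nil => intro j s; simp [ascAux]
  | cons x t ih =>
      intro j s
      simp only [List.cons_append, ascAux, ih]
      congr 1
      simp only [List.length_cons]
      push_cast
      ring

theorem descAux_append (d : List Int) (y : Int) : ∀ (j : Int) (s : Int × Int),
    descAux (d ++ [y]) j s = descStep (descAux d j s) (j + (d.length : Int)) y := by
  induction d with
  | nil => intro j s; simp [descAux]
  | cons x t ih =>
      intro j s
      simp only [List.cons_append, descAux, ih]
      congr 1
      simp only [List.length_cons]
      push_cast
      ring

theorem A_eq_loopD (hs : List Int) :
    find_steepestAscent_and_descent hs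
      = ((loopD (dmap hs) 0 (0, 0) (0, 0)).1.1, (loopD (dmap hs) 0 (0, 0) (0, 0)).1.2,
         (loopD (dmap hs) 0 (0, 0) (0, 0)).2.1, (loopD (dmap hs) 0 (0, 0) (0, 0)).2.2) := by
  induction hs using List.reverseRecOn with
  | nil => rfl
  | append_singleton ys x ih =>
      by_cases hne : ys = []
      · subst hne; rfl
      · have hlen : 1 ≤ (ys.length : Int) := by
          have := List.length_pos_of_ne_nil hne; omega
        have hr : PySem.List.pyRange 1 ((ys ++ [x]).length : Int) 1
            = PySem.List.pyRange 1 (ys.length : Int) 1 ++ [(ys.length : Int)] := by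
          have h2 : ((ys ++ [x]).length : Int) = (ys.length : Int) + 1 := by simp
          rw [h2, PySem.List.pyRange_one_succ_right hlen]
        have hcongr : (PySem.List.pyRange 1 (ys.length : Int) 1).foldl (stepA (ys ++ [x])) (0, 0, 0, 0)
            = (PySem.List.pyRange 1 (ys.length : Int) 1).foldl (stepA ys) (0, 0, 0, 0) := by
          apply PySem.List.foldl_congr_mem
          intro s i hi
          rw [PySem.List.mem_pyRange_one] at hi
          unfold stepA
          rw [pyGetD_app_left ys x i (by omega) (by omega),
              pyGetD_app_left ys x (i - 1) (by omega) (by omega)]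
        have hdlen : ((dmap ys).length : Int) = (ys.length : Int) - 1 := by
          unfold dmap
          simp [PySem.List.length_pyRange_one]
          omega
        simp only [loopD_eq] at ih ⊢
        unfold find_steepestAscent_and_descent at ih ⊢
        rw [hr, List.foldl_append, hcongr, ih]
        simp only [List.foldl_cons, List.foldl_nil]
        rw [stepA_pack (ys ++ [x])
              (ascAux (dmap ys) 0 (0, 0)) (descAux (dmap ys) 0 (0, 0)) (ys.length : Int),
            pyGetD_app_last, pyGetD_app_left ys x _ (by omega) (by omega),
            dmap_append ys x hne, ascAux_append, descAux_append, hdlen]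
        norm_num

-- B-side characterisation: the loop keeps the first index of the first maximum
theorem asc_char (d : List Int) : ascAux d 0 (0, 0) = ascOf d := by
  induction d using List.reverseRecOn with
  | nil => rfl
  | append_singleton t y ih =>
      rw [ascAux_append, ih]
      unfold ascOf
      by_cases hy : y > 0
      · have hf : (t ++ [y]).filter (fun x => x > 0)
            = t.filter (fun x => x > 0) ++ [y] := by
          simp [List.filter_append, hy]
        cases hmax : PySem.List.max? (t.filter (fun x => x > 0)) (fun x => x) with
        | none =>
            have ht : t.filter (fun x => x > 0) = [] := by
              rwa [PySem.List.max?_eq_none_iff] at hmax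
            have hyd : y ∉ t := by
              intro hmem
              have : y ∈ t.filter (fun x => x > 0) := by
                simp [List.mem_filter, hmem, hy]
              simp [ht] at this
            have hmx : PySem.List.max? ((t ++ [y]).filter (fun x => x > 0)) (fun x => x)
                = some y := by
              rw [hf, ht]; simpa using PySem.List.max?_id_cons y []
            have hidx : List.idxOf? y (t ++ [y]) = some t.length := by
              simpa using PySem.List.index?_append_singleton_self t y hyd
            rw [hmx]
            simp [ascStep, hy, hidx]
        | some m =>
            have hmmem : m ∈ t.filter (fun x => x > 0) := PySem.List.max?_mem hmax
            have hmt : m ∈ t := (List.mem_filter.mp hmmem).1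
            have hmax' : ∀ z ∈ t.filter (fun x => x > 0), z ≤ m := by
              intro z hz; exact PySem.List.max?_isMax hmax z hz
            obtain ⟨aa, tt, htt⟩ : ∃ aa tt, t.filter (fun x => x > 0) = aa :: tt := by
              cases h : t.filter (fun x => x > 0) with
              | nil =>
                  rw [h] at hmmem; simp at hmmem
              | cons a b => exact ⟨a, b, rfl⟩
            have hm_val : m = tt.foldl max aa := by
              have h2 := PySem.List.max?_id_cons aa tt
              rw [htt, h2] at hmax
              exact (Option.some_injective _ hmax).symm
            have hnew : PySem.List.max? ((t ++ [y]).filter (fun x => x > 0)) (fun x => x)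
                = some (max m y) := by
              rw [hf, htt, List.cons_append, PySem.List.max?_id_cons, List.foldl_append]
              simp [hm_val]
            rw [hnew]
            by_cases hym : y > m
            · have hmy : max m y = y := max_eq_right (le_of_lt hym)
              have hyd : y ∉ t := by
                intro hmem
                have : y ∈ t.filter (fun x => x > 0) := by
                  simp [List.mem_filter, hmem, hy]
                have := hmax' y this; omega
              have hidx : List.idxOf? y (t ++ [y]) = some t.length := by
                simpa using PySem.List.index?_append_singleton_self t y hyd
              rw [hmy]
              simp [ascStep, hy, hym, hidx]
            · have hmy : max m y = m := max_eq_left (by omega)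
              have hidx : List.idxOf? m (t ++ [y]) = List.idxOf? m t := by
                simpa using PySem.List.index?_append_of_mem [y] hmt
              rw [hmy]
              simp [ascStep, hidx]
              omega
      · have hf : (t ++ [y]).filter (fun x => x > 0) = t.filter (fun x => x > 0) := by
          simp [List.filter_append, hy]
        rw [hf]
        cases hmax : PySem.List.max? (t.filter (fun x => x > 0)) (fun x => x) with
        | none => simp [ascStep, hy]
        | some m =>
            have hmt : m ∈ t :=
              (List.mem_filter.mp (PySem.List.max?_mem hmax)).1
            have hidx : List.idxOf? m (t ++ [y]) = List.idxOf? m t := by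
              simpa using PySem.List.index?_append_of_mem [y] hmt
            simp [ascStep, hy, hidx]

theorem desc_char (d : List Int) : descAux d 0 (0, 0) = descOf d := by
  induction d using List.reverseRecOn with
  | nil => rfl
  | append_singleton t y ih =>
      rw [descAux_append, ih]
      unfold descOf
      by_cases hy : y < 0
      · have hf : (t ++ [y]).filter (fun x => x < 0)
            = t.filter (fun x => x < 0) ++ [y] := by
          simp [List.filter_append, hy]
        cases hmin : PySem.List.min? (t.filter (fun x => x < 0)) (fun x => x) with
        | none =>
            have ht : t.filter (fun x => x < 0) = [] := by
              rwa [PySem.List.min?_eq_none_iff] at hmin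
            have hyd : y ∉ t := by
              intro hmem
              have : y ∈ t.filter (fun x => x < 0) := by
                simp [List.mem_filter, hmem, hy]
              simp [ht] at this
            have hmn : PySem.List.min? ((t ++ [y]).filter (fun x => x < 0)) (fun x => x)
                = some y := by
              rw [hf, ht]; simpa using PySem.List.min?_id_cons y []
            have hidx : List.idxOf? y (t ++ [y]) = some t.length := by
              simpa using PySem.List.index?_append_singleton_self t y hyd
            rw [hmn]
            simp [descStep, hy, hidx]
        | some m =>
            have hmmem : m ∈ t.filter (fun x => x < 0) := PySem.List.min?_mem hmin
            have hmt : m ∈ t := (List.mem_filter.mp hmmem).1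
            have hmin' : ∀ z ∈ t.filter (fun x => x < 0), m ≤ z := by
              intro z hz; exact PySem.List.min?_isMin hmin z hz
            obtain ⟨aa, tt, htt⟩ : ∃ aa tt, t.filter (fun x => x < 0) = aa :: tt := by
              cases h : t.filter (fun x => x < 0) with
              | nil =>
                  rw [h] at hmmem; simp at hmmem
              | cons a b => exact ⟨a, b, rfl⟩
            have hm_val : m = tt.foldl min aa := by
              have h2 := PySem.List.min?_id_cons aa tt
              rw [htt, h2] at hmin
              exact (Option.some_injective _ hmin).symm
            have hnew : PySem.List.min? ((t ++ [y]).filter (fun x => x < 0)) (fun x => x)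
                = some (min m y) := by
              rw [hf, htt, List.cons_append, PySem.List.min?_id_cons, List.foldl_append]
              simp [hm_val]
            rw [hnew]
            by_cases hym : y < m
            · have hmy : min m y = y := min_eq_right (le_of_lt hym)
              have hyd : y ∉ t := by
                intro hmem
                have : y ∈ t.filter (fun x => x < 0) := by
                  simp [List.mem_filter, hmem, hy]
                have := hmin' y this; omega
              have hidx : List.idxOf? y (t ++ [y]) = some t.length := by
                simpa using PySem.List.index?_append_singleton_self t y hyd
              rw [hmy]
              have hmneg : m < 0 := by
                have := (List.mem_filter.mp hmmem).2; simpa using this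
              simp [descStep, hy, hidx]
              omega
            · have hmy : min m y = m := min_eq_left (by omega)
              have hidx : List.idxOf? m (t ++ [y]) = List.idxOf? m t := by
                simpa using PySem.List.index?_append_of_mem [y] hmt
              rw [hmy]
              simp [descStep, hidx]
              omega
      · have hf : (t ++ [y]).filter (fun x => x < 0) = t.filter (fun x => x < 0) := by
          simp [List.filter_append, hy]
        rw [hf]
        cases hmin : PySem.List.min? (t.filter (fun x => x < 0)) (fun x => x) with
        | none => simp [descStep, hy]
        | some m =>
            have hmt : m ∈ t :=
              (List.mem_filter.mp (PySem.List.min?_mem hmin)).1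
            have hidx : List.idxOf? m (t ++ [y]) = List.idxOf? m t := by
              simpa using PySem.List.index?_append_of_mem [y] hmt
            simp [descStep, hy, hidx]

theorem B_eq (hs : List Int) :
    find_steepestAscent_and_descent_alt hs
      = ((ascOf (dmap hs)).1, (ascOf (dmap hs)).2, (descOf (dmap hs)).1, (descOf (dmap hs)).2) := rfl

-- ===== VERDICT (by name: the statement is the Claim_ definition above) =====
theorem find_steepestAscent_and_descent_spec : Claim_equal_find_steepestAscent_and_descent := by
  intro hs _
  unfold Spec_find_steepestAscent_and_descent
  rw [A_eq_loopD, B_eq, loopD_eq, asc_char, desc_char]
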